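-- pv_equiv track=rewrite | github.com/Linshuanting/mpmc | ryu_controller/algorithm/greedy.py | is_connect_tree
-- ===== SOURCE A (Python) =====
-- from typing import List, Dict, Tuple, Set
--
-- def is_connect_tree(tree:Dict[Tuple[str, str], float], src:str, dsts:Set[str]) -> bool:
--
--     connected_nodes = set()
--
--     for u, v in tree.keys():
--         connected_nodes.add(u)
--         connected_nodes.add(v)
--
--     if src not in connected_nodes:
--         return False
--
--     for dst in dsts:
--         if dst not in connected_nodes:
--             return False
--
--     return True
-- ===== SOURCE B (Python) =====
-- def is_connect_tree(tree, src, dsts):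
--     # single pass over the edges, shrinking the set of still-unseen required nodes
--     needed = {src} | set(dsts)
--     for u, v in tree.keys():
--         needed.discard(u)
--         needed.discard(v)
--         if not needed:
--             return True
--     return not needed
-- ===== Notes on version B (the rewrite author's own statement) =====
-- stated objective: alternative
-- what changed: Instead of building the full endpoint set and then running a separate membership loop over src and each dst, B builds the required set {src} | set(dsts) once and makes a single early-exiting pass over the edges, discarding both endpoints from it and returning True as soon as it is empty.
import Mathlib
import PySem

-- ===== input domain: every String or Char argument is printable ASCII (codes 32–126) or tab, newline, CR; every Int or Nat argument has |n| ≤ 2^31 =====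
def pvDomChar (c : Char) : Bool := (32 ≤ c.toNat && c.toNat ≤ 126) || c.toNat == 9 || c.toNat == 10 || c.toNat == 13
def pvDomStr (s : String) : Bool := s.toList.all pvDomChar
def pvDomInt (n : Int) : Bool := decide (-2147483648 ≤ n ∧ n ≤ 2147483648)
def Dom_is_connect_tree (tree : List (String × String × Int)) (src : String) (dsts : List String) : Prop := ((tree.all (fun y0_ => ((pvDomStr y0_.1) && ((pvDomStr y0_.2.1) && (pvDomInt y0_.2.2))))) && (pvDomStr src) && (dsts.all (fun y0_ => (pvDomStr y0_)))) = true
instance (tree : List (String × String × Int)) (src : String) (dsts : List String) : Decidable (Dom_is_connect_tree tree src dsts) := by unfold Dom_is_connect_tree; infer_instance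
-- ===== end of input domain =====

-- B replaces A's build-endpoint-set-then-check-membership with a single early-exiting
-- edge scan that shrinks the set of still-required nodes {src} | set(dsts).
-- ===== PORT A =====
-- 'for dst in dsts: if dst not in connected_nodes: return False' (early return chain)
def is_connect_tree_dstloop (connected : PySem.Set String) : List String → Bool
  | [] => true
  | d :: ds => if !(PySem.Set.contains connected d) then false else is_connect_tree_dstloop connected ds

def is_connect_tree (tree : List (String × String × Int)) (src : String) (dsts : List String) : Bool :=
  -- connected_nodes = set(); for u, v in tree.keys(): add u; add v
  let connected_nodes : PySem.Set String :=
    tree.foldl (fun s e => PySem.Set.add (PySem.Set.add s e.1) e.2.1) PySem.Set.empty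
  if !(PySem.Set.contains connected_nodes src) then false
  else is_connect_tree_dstloop connected_nodes dsts

-- ===== PORT B =====
-- 'for u, v in tree.keys(): needed.discard(u); needed.discard(v); if not needed: return True'
def is_connect_tree_edgeloop : PySem.Set String → List (String × String × Int) → Bool
  | needed, [] => needed.isEmpty          -- return not needed
  | needed, e :: rest =>
      let needed' := PySem.Set.discard (PySem.Set.discard needed e.1) e.2.1
      if needed'.isEmpty then true else is_connect_tree_edgeloop needed' rest

def is_connect_tree_alt (tree : List (String × String × Int)) (src : String) (dsts : List String) : Bool :=
  let needed := PySem.Set.union (PySem.Set.ofList [src]) dsts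
  is_connect_tree_edgeloop needed tree

-- ===== PRECONDITION & SPEC =====
def Spec_is_connect_tree (tree : List (String × String × Int)) (src : String) (dsts : List String) (out : Bool) : Prop := out = is_connect_tree_alt tree src dsts
instance (tree : List (String × String × Int)) (src : String) (dsts : List String) (out : Bool) : Decidable (Spec_is_connect_tree tree src dsts out) := by unfold Spec_is_connect_tree; infer_instance

-- ===== CLAIM (what is proved, stated in full; the proofs are below) =====
def Claim_equal_is_connect_tree : Prop := ∀ (tree : List (String × String × Int)) (src : String) (dsts : List String), Dom_is_connect_tree tree src dsts → Spec_is_connect_tree tree src dsts (is_connect_tree tree src dsts)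

-- ===== LEMMAS AND PROOFS =====

theorem discard_nil (x : String) : PySem.Set.discard ([] : PySem.Set String) x = [] := by
  simp [PySem.Set.discard]

theorem edgeloop_nil_needed (rest : List (String × String × Int)) :
    is_connect_tree_edgeloop [] rest = true := by
  induction rest with
  | nil => rfl
  | cons e r ih => simp [is_connect_tree_edgeloop, discard_nil]

-- the B loop returns true iff every still-needed node occurs as an endpoint of a remaining edge
theorem edgeloop_eq (tree : List (String × String × Int)) (needed : PySem.Set String) :
    is_connect_tree_edgeloop needed tree
      = needed.all (fun x => tree.any (fun e => x == e.1 || x == e.2.1)) := by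
  induction tree generalizing needed with
  | nil => cases needed <;> simp [is_connect_tree_edgeloop, List.isEmpty]
  | cons e rest ih =>
      have hstep : is_connect_tree_edgeloop needed (e :: rest)
          = is_connect_tree_edgeloop (PySem.Set.discard (PySem.Set.discard needed e.1) e.2.1) rest := by
        simp only [is_connect_tree_edgeloop]
        split
        · rename_i h
          rw [List.isEmpty_iff] at h
          rw [h]
          simp [edgeloop_nil_needed]
        · rfl
      rw [hstep, ih]
      apply Bool.eq_iff_iff.mpr
      simp only [List.all_eq_true, PySem.Set.mem_discard, List.any_cons, Bool.or_eq_true,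
        beq_iff_eq]
      constructor
      · intro h x hx
        by_cases h1 : x = e.1
        · exact Or.inl (Or.inl h1)
        · by_cases h2 : x = e.2.1
          · exact Or.inl (Or.inr h2)
          · exact Or.inr (h x ⟨⟨hx, h1⟩, h2⟩)
      · rintro h x ⟨⟨hx, h1⟩, h2⟩
        rcases h x hx with (h3 | h3) | h3
        · exact absurd h3 h1
        · exact absurd h3 h2
        · exact h3

-- the A dst loop is an 'all'
theorem dstloop_eq (connected : PySem.Set String) (ds : List String) :
    is_connect_tree_dstloop connected ds = ds.all (fun d => PySem.Set.contains connected d) := by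
  induction ds with
  | nil => rfl
  | cons d ds ih =>
      simp only [is_connect_tree_dstloop, List.all_cons, ih]
      cases h : PySem.Set.contains connected d <;> simp_all

-- membership in the endpoint set A builds
theorem mem_connfold (tree : List (String × String × Int)) (s : PySem.Set String) (y : String) :
    (y ∈ tree.foldl (fun s e => PySem.Set.add (PySem.Set.add s e.1) e.2.1) s)
      ↔ y ∈ s ∨ ∃ e ∈ tree, y = e.1 ∨ y = e.2.1 := by
  induction tree generalizing s with
  | nil => simp
  | cons e rest ih =>
      simp only [List.foldl_cons, ih, PySem.Set.mem_add, List.mem_cons]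
      constructor
      · rintro (((h | h) | h) | ⟨f, hf, h⟩)
        · exact Or.inl h
        · exact Or.inr ⟨e, Or.inl rfl, Or.inl h⟩
        · exact Or.inr ⟨e, Or.inl rfl, Or.inr h⟩
        · exact Or.inr ⟨f, Or.inr hf, h⟩
      · rintro (h | ⟨f, (rfl | hf), h⟩)
        · exact Or.inl (Or.inl (Or.inl h))
        · rcases h with h | h
          · exact Or.inl (Or.inl (Or.inr h))
          · exact Or.inl (Or.inr h)
        · exact Or.inr ⟨f, hf, h⟩

-- ===== VERDICT (by name: the statement is the Claim_ definition above) =====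
theorem is_connect_tree_spec : Claim_equal_is_connect_tree := by
  intro tree src dsts _
  unfold Spec_is_connect_tree is_connect_tree is_connect_tree_alt
  rw [edgeloop_eq]
  have hA : ∀ (C : PySem.Set String),
      (if (!PySem.Set.contains C src) = true then false else is_connect_tree_dstloop C dsts)
        = (PySem.Set.contains C src && dsts.all (fun d => PySem.Set.contains C d)) := by
    intro C
    cases h : PySem.Set.contains C src <;> simp_all [dstloop_eq]
  simp only [hA]
  apply Bool.eq_iff_iff.mpr
  simp only [Bool.and_eq_true, List.all_eq_true, List.any_eq_true, Bool.or_eq_true,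
    beq_iff_eq, PySem.Set.contains_iff, PySem.Set.mem_union, mem_connfold,
    PySem.Set.mem_ofList, List.mem_singleton, PySem.Set.empty, List.not_mem_nil, false_or]
  constructor
  · rintro ⟨hsrc, hall⟩ x (rfl | hx)
    · exact hsrc
    · exact hall x hx
  · intro h
    exact ⟨h src (Or.inl rfl), fun d hd => h d (Or.inr hd)⟩
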